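-- pv_equiv track=rewrite | github.com/Whitestone2025/Bussines-intelligence-for-sme-s | scripts/serve_ui.py | curated_then_supporting
-- ===== SOURCE A (Python) =====
-- def unique_preserve(items: list[str]) -> list[str]:
--     seen = set()
--     output = []
--     for item in items:
--         normalized = item.strip()
--         if not normalized or normalized.lower() in seen:
--             continue
--         seen.add(normalized.lower())
--         output.append(normalized)
--     return output
--
-- def is_signal_noise(text: str, company_name: str = "") -> bool:
--     lowered = text.strip().lower()
--     if not lowered:
--         return True
--     if company_name and lowered.startswith(company_name.lower()):
--         return True
--     if lowered.startswith("the offer ") or lowered.startswith("our offer "):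
--         return True
--     if lowered.startswith("the main outcome is"):
--         return True
--     if "helps planners" in lowered or "helps founders" in lowered:
--         return True
--     if len(lowered.split()) > 20:
--         return True
--     return False
--
-- def curated_then_supporting(
--     primary_items: list[str],
--     supporting_items: list[str],
--     limit: int,
--     company_name: str = "",
--     curated_floor: int = 4,
-- ) -> list[str]:
--     curated = unique_preserve(primary_items)
--     if len(curated) >= min(limit, curated_floor):
--         return curated[:limit]
--
--     filtered_supporting = [
--         item
--         for item in supporting_items
--         if item
--         and item.strip()
--         and not is_signal_noise(item, company_name=company_name)
--         and item.strip().lower() not in {value.lower() for value in curated}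
--     ]
--     return unique_preserve(curated + filtered_supporting)[:limit]
-- ===== SOURCE B (Python) =====
-- def unique_preserve(items: list[str]) -> list[str]:
--     seen = set()
--     output = []
--     for item in items:
--         normalized = item.strip()
--         if not normalized or normalized.lower() in seen:
--             continue
--         seen.add(normalized.lower())
--         output.append(normalized)
--     return output
--
-- def is_signal_noise(text: str, company_name: str = "") -> bool:
--     lowered = text.strip().lower()
--     if not lowered:
--         return True
--     if company_name and lowered.startswith(company_name.lower()):
--         return True
--     if lowered.startswith("the offer ") or lowered.startswith("our offer "):
--         return True
--     if lowered.startswith("the main outcome is"):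
--         return True
--     if "helps planners" in lowered or "helps founders" in lowered:
--         return True
--     if len(lowered.split()) > 20:
--         return True
--     return False
--
-- def curated_then_supporting(
--     primary_items: list[str],
--     supporting_items: list[str],
--     limit: int,
--     company_name: str = "",
--     curated_floor: int = 4,
-- ) -> list[str]:
--     curated = unique_preserve(primary_items)
--     if len(curated) >= min(limit, curated_floor):
--         return curated[:limit]
--
--     seen = {c.lower() for c in curated}
--     result = list(curated)
--     for item in supporting_items:
--         if not item:
--             continue
--         stripped = item.strip()
--         if not stripped:
--             continue
--         if is_signal_noise(item, company_name=company_name):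
--             continue
--         key = stripped.lower()
--         if key in seen:
--             continue
--         seen.add(key)
--         result.append(stripped)
--     return result[:limit]
-- ===== Notes on version B (the rewrite author's own statement) =====
-- stated objective: simpler
-- what changed: Replaced the fallback's filter-comprehension (with a per-item rebuilt curated-lowercase set) plus a second unique_preserve pass over curated+filtered by one fused loop over supporting_items with a single seen-set initialized from curated, appending directly to a result list seeded with curated.
import Mathlib
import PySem

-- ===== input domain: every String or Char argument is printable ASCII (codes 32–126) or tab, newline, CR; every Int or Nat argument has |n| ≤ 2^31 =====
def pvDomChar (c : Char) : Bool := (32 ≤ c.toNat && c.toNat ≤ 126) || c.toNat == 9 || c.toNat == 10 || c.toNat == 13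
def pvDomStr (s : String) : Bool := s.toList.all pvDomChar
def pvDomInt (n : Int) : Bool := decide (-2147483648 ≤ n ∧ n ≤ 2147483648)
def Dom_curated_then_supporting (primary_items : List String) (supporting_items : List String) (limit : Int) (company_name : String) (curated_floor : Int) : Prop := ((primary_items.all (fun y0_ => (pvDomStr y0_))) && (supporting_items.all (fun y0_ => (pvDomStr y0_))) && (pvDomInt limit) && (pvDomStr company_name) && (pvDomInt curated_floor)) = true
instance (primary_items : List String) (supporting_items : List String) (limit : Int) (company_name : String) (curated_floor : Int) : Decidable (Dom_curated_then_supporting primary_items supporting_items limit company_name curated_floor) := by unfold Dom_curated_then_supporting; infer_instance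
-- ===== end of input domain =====

-- B replaces A's fallback (filter-comprehension + second unique_preserve pass) with one fused
-- loop over supporting_items, seeding the seen-set and result from curated; objective: simpler.

-- ===== PORT A =====
-- loop body of unique_preserve: state = (seen, output)
def upStep (st : PySem.Set String × List String) (item : String) : PySem.Set String × List String :=
  let normalized := PySem.Str.strip item
  if normalized = "" ∨ PySem.Set.contains st.1 (PySem.Str.lower normalized) = true then st
  else (PySem.Set.add st.1 (PySem.Str.lower normalized), st.2 ++ [normalized])

def uniquePreserve (items : List String) : List String :=
  (items.foldl upStep (PySem.Set.empty, [])).2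

def isSignalNoise (text : String) (company_name : String) : Bool :=
  let lowered := PySem.Str.lower (PySem.Str.strip text)
  if lowered = "" then true
  else if company_name ≠ "" ∧ PySem.Str.startswith lowered (PySem.Str.lower company_name) = true then true
  else if PySem.Str.startswith lowered "the offer " = true ∨ PySem.Str.startswith lowered "our offer " = true then true
  else if PySem.Str.startswith lowered "the main outcome is" = true then true
  else if PySem.Str.isIn "helps planners" lowered = true ∨ PySem.Str.isIn "helps founders" lowered = true then true
  else if 20 < (PySem.Str.split₀ lowered).length then true
  else false

-- the condition of A's filter comprehension
def keepPred (company_name : String) (curatedLows : PySem.Set String) (item : String) : Bool :=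
  !(item == "") && !(PySem.Str.strip item == "") && !(isSignalNoise item company_name)
    && !(PySem.Set.contains curatedLows (PySem.Str.lower (PySem.Str.strip item)))

def curated_then_supporting (primary_items : List String) (supporting_items : List String) (limit : Int) (company_name : String) (curated_floor : Int) : List String :=
  let curated := uniquePreserve primary_items
  if min limit curated_floor ≤ (curated.length : Int) then
    PySem.List.slice curated none (some limit)
  else
    let filtered := supporting_items.filter
      (keepPred company_name (PySem.Set.ofList (curated.map PySem.Str.lower)))
    PySem.List.slice (uniquePreserve (curated ++ filtered)) none (some limit)

-- ===== PORT B =====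
-- body of B's single fused loop: state = (seen, result)
def fusedStep (company_name : String) (st : PySem.Set String × List String) (item : String) : PySem.Set String × List String :=
  if item = "" then st
  else
    let stripped := PySem.Str.strip item
    if stripped = "" then st
    else if isSignalNoise item company_name = true then st
    else
      let key := PySem.Str.lower stripped
      if PySem.Set.contains st.1 key = true then st
      else (PySem.Set.add st.1 key, st.2 ++ [stripped])

def curated_then_supporting_alt (primary_items : List String) (supporting_items : List String) (limit : Int) (company_name : String) (curated_floor : Int) : List String :=
  let curated := uniquePreserve primary_items
  if min limit curated_floor ≤ (curated.length : Int) then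
    PySem.List.slice curated none (some limit)
  else
    let seen := PySem.Set.ofList (curated.map PySem.Str.lower)
    let result := supporting_items.foldl (fusedStep company_name) (seen, curated)
    PySem.List.slice result.2 none (some limit)

-- ===== PRECONDITION & SPEC =====
def Spec_curated_then_supporting (primary_items : List String) (supporting_items : List String) (limit : Int) (company_name : String) (curated_floor : Int) (out : List String) : Prop := out = curated_then_supporting_alt primary_items supporting_items limit company_name curated_floor
instance (primary_items : List String) (supporting_items : List String) (limit : Int) (company_name : String) (curated_floor : Int) (out : List String) : Decidable (Spec_curated_then_supporting primary_items supporting_items limit company_name curated_floor out) := by unfold Spec_curated_then_supporting; infer_instance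

-- ===== CLAIM (what is proved, stated in full; the proofs are below) =====
def Claim_equal_curated_then_supporting : Prop := ∀ (primary_items : List String) (supporting_items : List String) (limit : Int) (company_name : String) (curated_floor : Int), Dom_curated_then_supporting primary_items supporting_items limit company_name curated_floor → Spec_curated_then_supporting primary_items supporting_items limit company_name curated_floor (curated_then_supporting primary_items supporting_items limit company_name curated_floor)

-- ===== LEMMAS AND PROOFS =====

-- strip is idempotent (needed: re-running unique_preserve over its own output changes nothing)
theorem chars_lstrip_of_prefix (p : Char → Bool) (l l₁ : List Char)
    (hl : List.dropWhile p l = l) (hpre : l₁ <+: l) : List.dropWhile p l₁ = l₁ := by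
  cases l₁ with
  | nil => rfl
  | cons a t =>
    obtain ⟨u, hu⟩ := hpre
    have hpa : p a = false := by
      by_contra hpa
      have hpa' : p a = true := by revert hpa; cases p a <;> simp
      rw [← hu, List.cons_append] at hl
      simp [hpa'] at hl
      have h2 := List.length_dropWhile_le p (t ++ u)
      rw [hl] at h2
      simp at h2
    simp [List.dropWhile, hpa]

theorem chars_rstrip_prefix (s : List Char) : PySem.Chars.rstrip s <+: s := by
  have h := List.dropWhile_suffix (l := s.reverse) PySem.Chars.isspace
  have := h.reverse
  simpa [PySem.Chars.rstrip] using this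

theorem chars_strip_idem (s : List Char) :
    PySem.Chars.strip (PySem.Chars.strip s) = PySem.Chars.strip s := by
  unfold PySem.Chars.strip
  have h2 : PySem.Chars.lstrip (PySem.Chars.rstrip (PySem.Chars.lstrip s)) =
      PySem.Chars.rstrip (PySem.Chars.lstrip s) := by
    apply chars_lstrip_of_prefix _ (PySem.Chars.lstrip s)
    · simpa [PySem.Chars.lstrip] using List.dropWhile_idempotent PySem.Chars.isspace s
    · exact chars_rstrip_prefix _
  rw [h2]
  simp [PySem.Chars.rstrip, List.dropWhile_idempotent]

theorem str_strip_idem (s : String) :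
    PySem.Str.strip (PySem.Str.strip s) = PySem.Str.strip s := by
  apply String.toList_inj.mp
  simp only [PySem.Str.toList_strip]
  exact chars_strip_idem _

theorem ofList_append_singleton {α : Type} [BEq α] (xs : List α) (x : α) :
    PySem.Set.ofList (xs ++ [x]) = (PySem.Set.ofList xs).add x := by
  rw [PySem.Set.ofList_eq_foldl, PySem.Set.ofList_eq_foldl, List.foldl_append]; rfl

-- invariant of A's unique_preserve fold: output items are stripped, nonempty, with pairwise
-- distinct lowercases, and the seen-set is exactly the set of their lowercases
theorem up_inv (items : List String) (S : PySem.Set String) (out : List String)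
    (hS : S = PySem.Set.ofList (out.map PySem.Str.lower))
    (hout : ∀ c ∈ out, PySem.Str.strip c = c ∧ c ≠ "")
    (hnd : (out.map PySem.Str.lower).Nodup) :
    (items.foldl upStep (S, out)).1
        = PySem.Set.ofList ((items.foldl upStep (S, out)).2.map PySem.Str.lower)
      ∧ (∀ c ∈ (items.foldl upStep (S, out)).2, PySem.Str.strip c = c ∧ c ≠ "")
      ∧ ((items.foldl upStep (S, out)).2.map PySem.Str.lower).Nodup := by
  induction items generalizing S out with
  | nil => exact ⟨hS, hout, hnd⟩
  | cons x xs ih =>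
    simp only [List.foldl_cons]
    by_cases hs : PySem.Str.strip x = ""
    · rw [show upStep (S, out) x = (S, out) by simp [upStep, hs]]
      exact ih S out hS hout hnd
    · by_cases hm : PySem.Str.lower (PySem.Str.strip x) ∈ S
      · rw [show upStep (S, out) x = (S, out) by simp [upStep, hs, hm]]
        exact ih S out hS hout hnd
      · rw [show upStep (S, out) x
              = (PySem.Set.add S (PySem.Str.lower (PySem.Str.strip x)), out ++ [PySem.Str.strip x]) by
            simp [upStep, hs, hm]]
        have hnotl : PySem.Str.lower (PySem.Str.strip x) ∉ out.map PySem.Str.lower := by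
          intro hmem
          exact hm (by rw [hS, PySem.Set.mem_ofList]; exact hmem)
        apply ih
        · rw [hS, List.map_append, List.map_cons, List.map_nil, ofList_append_singleton]
        · intro c hc
          rcases List.mem_append.mp hc with h | h
          · exact hout c h
          · simp at h; subst h; exact ⟨str_strip_idem x, hs⟩
        · rw [List.map_append, List.map_cons, List.map_nil]
          apply List.Nodup.append hnd (List.nodup_singleton _)
          intro a ha hb
          simp at hb
          subst hb
          exact hnotl ha

-- re-running the unique_preserve fold over an already-unique, stripped list reproduces it
theorem refold (rest : List String) : ∀ (pre : List String),
    (∀ c ∈ pre ++ rest, PySem.Str.strip c = c ∧ c ≠ "") →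
    ((pre ++ rest).map PySem.Str.lower).Nodup →
    rest.foldl upStep (PySem.Set.ofList (pre.map PySem.Str.lower), pre)
      = (PySem.Set.ofList ((pre ++ rest).map PySem.Str.lower), pre ++ rest) := by
  induction rest with
  | nil => intro pre _ _; simp
  | cons r rs ih =>
    intro pre hprops hnd
    have hr : PySem.Str.strip r = r ∧ r ≠ "" := hprops r (by simp)
    have hnotmem : PySem.Str.lower r ∉ PySem.Set.ofList (pre.map PySem.Str.lower) := by
      rw [PySem.Set.mem_ofList]
      intro hmem
      have h2 := hnd
      rw [List.map_append, List.map_cons] at h2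
      have hd := List.disjoint_of_nodup_append h2
      exact hd hmem (by simp)
    simp only [List.foldl_cons]
    rw [show upStep (PySem.Set.ofList (pre.map PySem.Str.lower), pre) r
          = (PySem.Set.ofList ((pre ++ [r]).map PySem.Str.lower), pre ++ [r]) by
        simp only [upStep, hr.1]
        rw [if_neg (by
          intro h
          rcases h with h | h
          · exact hr.2 h
          · exact hnotmem ((PySem.Set.contains_iff _ _).mp h))]
        rw [List.map_append, List.map_cons, List.map_nil, ofList_append_singleton]]
    rw [ih (pre ++ [r]) (by simpa using hprops) (by simpa using hnd)]
    simp

-- the fused loop equals filter-then-unique_preserve-fold, for any state whose seen-set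
-- contains the curated lowercases
theorem fuse (cn : String) (S0 : PySem.Set String) (xs : List String) :
    ∀ (S : PySem.Set String) (out : List String), (∀ x ∈ S0, x ∈ S) →
    (xs.filter (keepPred cn S0)).foldl upStep (S, out)
      = xs.foldl (fusedStep cn) (S, out) := by
  induction xs with
  | nil => intro S out _; rfl
  | cons x xs ih =>
    intro S out hsub
    by_cases hx : x = ""
    · rw [show List.filter (keepPred cn S0) (x :: xs) = List.filter (keepPred cn S0) xs by
        simp [List.filter, keepPred, hx]]
      rw [List.foldl_cons, show fusedStep cn (S, out) x = (S, out) by simp [fusedStep, hx]]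
      exact ih S out hsub
    · by_cases hs : PySem.Str.strip x = ""
      · rw [show List.filter (keepPred cn S0) (x :: xs) = List.filter (keepPred cn S0) xs by
          simp [List.filter, keepPred, hs]]
        rw [List.foldl_cons, show fusedStep cn (S, out) x = (S, out) by simp [fusedStep, hx, hs]]
        exact ih S out hsub
      · by_cases hn : isSignalNoise x cn = true
        · rw [show List.filter (keepPred cn S0) (x :: xs) = List.filter (keepPred cn S0) xs by
            simp [List.filter, keepPred, hn]]
          rw [List.foldl_cons, show fusedStep cn (S, out) x = (S, out) by
            simp [fusedStep, hx, hs, hn]]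
          exact ih S out hsub
        · by_cases h0 : PySem.Str.lower (PySem.Str.strip x) ∈ S0
          · have hkS : PySem.Str.lower (PySem.Str.strip x) ∈ S := hsub _ h0
            rw [show List.filter (keepPred cn S0) (x :: xs) = List.filter (keepPred cn S0) xs by
              simp [List.filter, keepPred, h0]]
            rw [List.foldl_cons, show fusedStep cn (S, out) x = (S, out) by
              simp [fusedStep, hx, hs, hn, hkS]]
            exact ih S out hsub
          · rw [show List.filter (keepPred cn S0) (x :: xs)
                  = x :: List.filter (keepPred cn S0) xs by
              have hxb : (x == "") = false := beq_eq_false_iff_ne.mpr hx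
              have hsb : (PySem.Str.strip x == "") = false := beq_eq_false_iff_ne.mpr hs
              simp [List.filter, keepPred, hxb, hsb, hn, h0]]
            rw [List.foldl_cons, List.foldl_cons]
            by_cases hk : PySem.Str.lower (PySem.Str.strip x) ∈ S
            · rw [show upStep (S, out) x = (S, out) by simp [upStep, hk],
                show fusedStep cn (S, out) x = (S, out) by simp [fusedStep, hx, hs, hn, hk]]
              exact ih S out hsub
            · rw [show upStep (S, out) x
                    = (PySem.Set.add S (PySem.Str.lower (PySem.Str.strip x)), out ++ [PySem.Str.strip x]) by
                  simp [upStep, hs, hk],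
                show fusedStep cn (S, out) x
                    = (PySem.Set.add S (PySem.Str.lower (PySem.Str.strip x)), out ++ [PySem.Str.strip x]) by
                  simp [fusedStep, hx, hs, hn, hk]]
              exact ih _ _ (fun y hy => (PySem.Set.mem_add S _ y).mpr (Or.inl (hsub y hy)))

-- properties of uniquePreserve's output
theorem uniquePreserve_props (items : List String) :
    (∀ c ∈ uniquePreserve items, PySem.Str.strip c = c ∧ c ≠ "")
      ∧ ((uniquePreserve items).map PySem.Str.lower).Nodup := by
  have h := up_inv items PySem.Set.empty [] (by rfl) (by simp) (by simp)
  exact ⟨h.2.1, h.2.2⟩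

-- ===== VERDICT (by name: the statement is the Claim_ definition above) =====
theorem curated_then_supporting_spec : Claim_equal_curated_then_supporting := by
  intro p s limit cn cf _
  unfold Spec_curated_then_supporting curated_then_supporting curated_then_supporting_alt
  by_cases hthr : min limit cf ≤ ((uniquePreserve p).length : Int)
  · simp [hthr]
  · simp only [hthr, if_false]
    congr 1
    set curated := uniquePreserve p with hcur
    obtain ⟨hprops, hnd⟩ := uniquePreserve_props p
    rw [← hcur] at hprops hnd
    have hre : curated.foldl upStep (PySem.Set.empty, [])
        = (PySem.Set.ofList (curated.map PySem.Str.lower), curated) := by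
      have := refold curated [] (by simpa using hprops) (by simpa using hnd)
      simpa using this
    rw [show uniquePreserve (curated ++ List.filter (keepPred cn (PySem.Set.ofList (curated.map PySem.Str.lower))) s)
          = ((List.filter (keepPred cn (PySem.Set.ofList (curated.map PySem.Str.lower))) s).foldl upStep
              (PySem.Set.ofList (curated.map PySem.Str.lower), curated)).2 by
        unfold uniquePreserve; rw [List.foldl_append, hre]]
    rw [fuse cn _ s _ curated (fun x hx => hx)]
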